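-- pv_equiv track=rewrite | github.com/luke6a52/AdventOfCode | 2023/Day12Bad.py | checkOption
-- ===== SOURCE A (Python) =====
-- def checkOption(option, groups):
--     groups = groups.copy()
--     count = 0
--     for j, spring in enumerate(option):
--         if spring == '#':
--             count += 1
--             if len(groups) == 0 or count > groups[0]:
--                 return False
--         elif spring == '.':
--             if count > 0:
--                 if len(groups) == 0 or count < groups[0]:
--                     return False
--                 groups.pop(0)
--             count = 0
--         else:
--             return len(groups) == 0 or (len(option) - j) >= (len(groups) - 1) + (sum(groups) - count)
--     return len(groups) == 0 or (len(groups) == 1 and count == groups[0])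
-- ===== SOURCE B (Python) =====
-- def checkOption(option, groups):
--     n = len(option)
--     # index of the first character that is neither '#' nor '.' (the early-exit boundary)
--     j = next((i for i, c in enumerate(option) if c not in '#.'), n)
--     # run-length encode option[:j]: completed '#'-runs plus the trailing in-progress run
--     runs = []
--     count = 0
--     for c in option[:j]:
--         if c == '#':
--             count += 1
--         else:
--             if count > 0:
--                 runs.append(count)
--             count = 0
--     k = len(runs)
--     if runs != groups[:k]:
--         return False
--     if count > 0 and (k == len(groups) or count > groups[k]):
--         return False
--     rem = groups[k:]
--     if j < n:
--         return len(rem) == 0 or (n - j) >= (len(rem) - 1) + (sum(rem) - count)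
--     return len(rem) == 0 or (len(rem) == 1 and count == rem[0])
-- ===== Notes on version B (the rewrite author's own statement) =====
-- stated objective: alternative
-- what changed: Replaces A's stateful char-by-char scan with incremental failure checks by first locating the boundary (first char outside '#.'), run-length encoding the prefix, and validating the completed runs against groups in one comparison.
import Mathlib
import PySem

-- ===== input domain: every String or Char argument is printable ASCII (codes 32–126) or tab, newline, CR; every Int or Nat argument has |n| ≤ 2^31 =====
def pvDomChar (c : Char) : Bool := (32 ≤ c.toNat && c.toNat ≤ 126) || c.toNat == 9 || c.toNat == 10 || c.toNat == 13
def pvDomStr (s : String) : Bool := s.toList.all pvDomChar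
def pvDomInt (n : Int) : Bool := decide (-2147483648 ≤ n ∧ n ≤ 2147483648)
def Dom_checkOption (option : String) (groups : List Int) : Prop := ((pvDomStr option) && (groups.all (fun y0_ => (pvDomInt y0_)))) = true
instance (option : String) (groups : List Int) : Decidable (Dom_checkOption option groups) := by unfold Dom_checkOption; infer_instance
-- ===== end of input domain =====

-- B replaces A's stateful left-to-right scan by a boundary-search + run-length
-- encoding of the prefix, checked once against the groups (objective: alternative decomposition).

-- ===== PORT A =====
-- literal port of A's enumerate loop; n = len(option), j = current index
def checkOptionLoop (n : Int) : List Char → Int → List Int → Int → Bool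
  | [], _, groups, count =>
      decide (groups = [] ∨ (groups.length = 1 ∧ count = groups.headD 0))
  | spring :: rest, j, groups, count =>
      if spring = '#' then
        let count := count + 1
        if groups = [] ∨ count > groups.headD 0 then false
        else checkOptionLoop n rest (j + 1) groups count
      else if spring = '.' then
        if count > 0 then
          if groups = [] ∨ count < groups.headD 0 then false
          else checkOptionLoop n rest (j + 1) groups.tail 0
        else checkOptionLoop n rest (j + 1) groups 0
      else
        decide (groups = [] ∨ n - j ≥ ((groups.length : Int) - 1) + (groups.sum - count))

def checkOption (option : String) (groups : List Int) : Bool :=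
  let cs := option.toList
  checkOptionLoop (cs.length : Int) cs 0 groups 0

-- ===== PORT B =====
-- one fold step of Source B's run-length-encoding loop over option[:j]
def rleStep (p : List Int × Int) (c : Char) : List Int × Int :=
  if c = '#' then (p.1, p.2 + 1)
  else (if p.2 > 0 then p.1 ++ [p.2] else p.1, 0)

def checkOption_alt (option : String) (groups : List Int) : Bool :=
  let cs := option.toList
  let n := cs.length
  let j := cs.findIdx (fun c => !(c = '#' || c = '.'))
  let p := (cs.take j).foldl rleStep ([], 0)
  let runs := p.1
  let count := p.2
  let k := runs.length
  if ¬ (runs = groups.take k) then false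
  else if count > 0 ∧ (k = groups.length ∨ count > groups.getD k 0) then false
  else
    let rem := groups.drop k
    if j < n then
      decide (rem = [] ∨ ((n : Int) - (j : Int)) ≥ ((rem.length : Int) - 1) + (rem.sum - count))
    else
      decide (rem = [] ∨ (rem.length = 1 ∧ count = rem.headD 0))

-- ===== PRECONDITION & SPEC =====
def Spec_checkOption (option : String) (groups : List Int) (out : Bool) : Prop := out = checkOption_alt option groups
instance (option : String) (groups : List Int) (out : Bool) : Decidable (Spec_checkOption option groups out) := by unfold Spec_checkOption; infer_instance

-- ===== CLAIM (what is proved, stated in full; the proofs are below) =====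
def Claim_equal_checkOption : Prop := ∀ (option : String) (groups : List Int), Dom_checkOption option groups → Spec_checkOption option groups (checkOption option groups)

-- ===== LEMMAS AND PROOFS =====

-- recursive characterisation of the RLE fold, for the proofs
def rleAux (count : Int) : List Char → List Int × Int
  | [] => ([], count)
  | c :: cs =>
      if c = '#' then rleAux (count + 1) cs
      else if 0 < count then ((count :: (rleAux 0 cs).1), (rleAux 0 cs).2)
      else rleAux 0 cs

lemma rleAux_nil (count : Int) : rleAux count [] = ([], count) := rfl

lemma rleAux_hash (count : Int) (cs : List Char) :
    rleAux count ('#' :: cs) = rleAux (count + 1) cs := by simp [rleAux]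

lemma rleAux_dot_pos (count : Int) (cs : List Char) (h : 0 < count) :
    rleAux count ('.' :: cs) = ((count :: (rleAux 0 cs).1), (rleAux 0 cs).2) := by
  simp [rleAux, h]

lemma rleAux_dot_zero (cs : List Char) : rleAux 0 ('.' :: cs) = rleAux 0 cs := by
  simp [rleAux]

lemma foldl_rleStep (cs : List Char) : ∀ (runs : List Int) (count : Int),
    cs.foldl rleStep (runs, count) = (runs ++ (rleAux count cs).1, (rleAux count cs).2) := by
  induction cs with
  | nil => intro runs count; simp [rleAux]
  | cons c cs ih =>
      intro runs count
      by_cases hc : c = '#'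
      · simp [rleStep, rleAux, hc, ih]
      · by_cases hp : 0 < count
        · simp [rleStep, rleAux, hc, hp, ih]
        · simp [rleStep, rleAux, hc, hp, ih]

lemma fIdx_hash (cs : List Char) :
    List.findIdx (fun c => !(c = '#' || c = '.')) ('#' :: cs) =
      List.findIdx (fun c => !(c = '#' || c = '.')) cs + 1 := by
  simp [List.findIdx_cons]

lemma fIdx_dot (cs : List Char) :
    List.findIdx (fun c => !(c = '#' || c = '.')) ('.' :: cs) =
      List.findIdx (fun c => !(c = '#' || c = '.')) cs + 1 := by
  simp [List.findIdx_cons]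

lemma fIdx_other (cs : List Char) (c : Char) (hch : c ≠ '#') (hcd : c ≠ '.') :
    List.findIdx (fun c => !(c = '#' || c = '.')) (c :: cs) = 0 := by
  simp [List.findIdx_cons, hch, hcd]

-- the tail of B's computation, abstracted over the RLE result and the boundary data
def bTail (groups runs : List Int) (c : Int) (found : Bool) (remLen : Int) : Bool :=
  if ¬ (runs = groups.take runs.length) then false
  else if c > 0 ∧ (runs.length = groups.length ∨ c > groups.getD runs.length 0) then false
  else if found then
    decide (groups.drop runs.length = [] ∨
      remLen ≥ (((groups.drop runs.length).length : Int) - 1) + ((groups.drop runs.length).sum - c))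
  else
    decide (groups.drop runs.length = [] ∨
      ((groups.drop runs.length).length = 1 ∧ c = (groups.drop runs.length).headD 0))

lemma bTail_cons (g : Int) (gs rs : List Int) (c : Int) (f : Bool) (rl : Int) :
    bTail (g :: gs) (g :: rs) c f rl = bTail gs rs c f rl := by
  simp [bTail]

-- B's computation started from an arbitrary in-progress run length (proof helper)
def bGen (cs : List Char) (groups : List Int) (count : Int) : Bool :=
  bTail groups
    (rleAux count (cs.take (cs.findIdx (fun c => !(c = '#' || c = '.'))))).1
    (rleAux count (cs.take (cs.findIdx (fun c => !(c = '#' || c = '.'))))).2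
    (decide (cs.findIdx (fun c => !(c = '#' || c = '.')) < cs.length))
    ((cs.length : Int) - (cs.findIdx (fun c => !(c = '#' || c = '.')) : Int))

lemma alt_eq_bGen (option : String) (groups : List Int) :
    checkOption_alt option groups = bGen option.toList groups 0 := by
  simp [checkOption_alt, bGen, bTail, foldl_rleStep]

lemma bGen_cons_hash (cs : List Char) (groups : List Int) (count : Int) :
    bGen ('#' :: cs) groups count = bGen cs groups (count + 1) := by
  unfold bGen
  rw [fIdx_hash, List.take_succ_cons, rleAux_hash]
  congr 1
  · simp
  · simp only [List.length_cons]; push_cast; ring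

lemma bGen_cons_dot_zero (cs : List Char) (groups : List Int) :
    bGen ('.' :: cs) groups 0 = bGen cs groups 0 := by
  unfold bGen
  rw [fIdx_dot, List.take_succ_cons, rleAux_dot_zero]
  congr 1
  · simp
  · simp only [List.length_cons]; push_cast; ring

lemma bGen_cons_dot_close (cs : List Char) (gs : List Int) (g : Int) (hg : 0 < g) :
    bGen ('.' :: cs) (g :: gs) g = bGen cs gs 0 := by
  unfold bGen
  rw [fIdx_dot, List.take_succ_cons, rleAux_dot_pos _ _ hg, bTail_cons]
  congr 1
  · simp
  · simp only [List.length_cons]; push_cast; ring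

lemma bGen_cons_dot_lt (cs : List Char) (gs : List Int) (g count : Int)
    (hc : 0 < count) (hne : count ≠ g) :
    bGen ('.' :: cs) (g :: gs) count = false := by
  unfold bGen
  rw [fIdx_dot, List.take_succ_cons, rleAux_dot_pos _ _ hc]
  unfold bTail
  rw [if_pos]
  simp [hne]

lemma bGen_cons_other (cs : List Char) (groups : List Int) (count : Int) (c : Char)
    (hch : c ≠ '#') (hcd : c ≠ '.') :
    bGen (c :: cs) groups count = bTail groups [] count true ((cs.length : Int) + 1) := by
  unfold bGen
  rw [fIdx_other cs c hch hcd]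
  simp only [List.take_zero, rleAux_nil, List.length_cons, Nat.cast_zero]
  congr 1

lemma bGen_false (cs : List Char) : ∀ (groups : List Int) (count : Int), 0 < count →
    (groups = [] ∨ ∃ g gs, groups = g :: gs ∧ g < count) → bGen cs groups count = false := by
  induction cs with
  | nil =>
      intro groups count hc hg
      unfold bGen
      simp only [List.findIdx_nil, List.take_zero, rleAux_nil, List.length_nil]
      rcases hg with rfl | ⟨g, gs, rfl, hlt⟩
      · simp [bTail, hc]
      · simp [bTail, hc]
        omega
  | cons c cs ih =>
      intro groups count hc hg
      by_cases hch : c = '#'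
      · subst hch
        rw [bGen_cons_hash]
        apply ih _ _ (by omega)
        rcases hg with rfl | ⟨g, gs, rfl, hlt⟩
        · exact Or.inl rfl
        · exact Or.inr ⟨g, gs, rfl, by omega⟩
      · by_cases hcd : c = '.'
        · subst hcd
          unfold bGen
          rw [fIdx_dot, List.take_succ_cons, rleAux_dot_pos _ _ hc]
          unfold bTail
          rw [if_pos]
          rcases hg with rfl | ⟨g, gs, rfl, hlt⟩
          · simp
          · simp
            omega
        · rw [bGen_cons_other cs groups count c hch hcd]
          unfold bTail
          rcases hg with rfl | ⟨g, gs, rfl, hlt⟩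
          · simp [hc]
          · simp [hc]
            omega

lemma loop_eq_bGen (cs : List Char) : ∀ (n j : Int) (groups : List Int) (count : Int),
    n = j + (cs.length : Int) →
    (count = 0 ∨ ∃ g gs, groups = g :: gs ∧ 0 < count ∧ count ≤ g) →
    checkOptionLoop n cs j groups count = bGen cs groups count := by
  induction cs with
  | nil =>
      intro n j groups count hn hinv
      unfold checkOptionLoop bGen
      simp only [List.findIdx_nil, List.take_zero, rleAux_nil, List.length_nil]
      unfold bTail
      rcases hinv with rfl | ⟨g, gs, rfl, hpos, hle⟩
      · simp
      · rw [if_neg (by simp), if_neg (by simp; omega)]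
        simp
  | cons c cs ih =>
      intro n j groups count hn hinv
      simp only [List.length_cons] at hn
      by_cases hch : c = '#'
      · subst hch
        rw [bGen_cons_hash]
        show (if groups = [] ∨ count + 1 > groups.headD 0 then false
              else checkOptionLoop n cs (j + 1) groups (count + 1)) = _
        by_cases hguard : groups = [] ∨ groups.headD 0 < count + 1
        · rw [if_pos (by rcases hguard with rfl | h; exact Or.inl rfl; exact Or.inr h)]
          rw [bGen_false cs groups (count + 1)
            (by rcases hinv with rfl | ⟨g, gs, rfl, hp, _⟩ <;> omega) ?_]
          rcases hguard with rfl | h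
          · exact Or.inl rfl
          · cases groups with
            | nil => exact Or.inl rfl
            | cons g gs => exact Or.inr ⟨g, gs, rfl, by simpa using h⟩
        · push Not at hguard
          obtain ⟨hne, hle⟩ := hguard
          cases groups with
          | nil => exact absurd rfl hne
          | cons g gs =>
              simp only [List.headD_cons] at hle
              rw [if_neg (by push Not; exact ⟨hne, by simpa using hle⟩)]
              exact ih n (j + 1) (g :: gs) (count + 1) (by omega)
                (Or.inr ⟨g, gs, rfl, by omega, by omega⟩)
      · by_cases hcd : c = '.'
        · subst hcd
          show (if ('.' : Char) = '#' then _ else if ('.' : Char) = '.' then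
                (if count > 0 then
                  if groups = [] ∨ count < groups.headD 0 then false
                  else checkOptionLoop n cs (j + 1) groups.tail 0
                 else checkOptionLoop n cs (j + 1) groups 0) else _) = _
          rcases hinv with rfl | ⟨g, gs, rfl, hpos, hle⟩
          · rw [bGen_cons_dot_zero]
            rw [if_neg (by decide), if_pos rfl, if_neg (by omega)]
            exact ih n (j + 1) groups 0 (by omega) (Or.inl rfl)
          · rw [if_neg (by decide), if_pos rfl, if_pos (show count > 0 from hpos)]
            by_cases hlt : count < g
            · rw [bGen_cons_dot_lt cs gs g count hpos (by omega)]
              rw [if_pos (Or.inr (by simpa using hlt))]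
            · have hg : count = g := by omega
              subst hg
              rw [bGen_cons_dot_close cs gs count hpos]
              rw [if_neg (by push Not; exact ⟨by simp, by simp⟩)]
              exact ih n (j + 1) gs 0 (by omega) (Or.inl rfl)
        · show (if c = '#' then _ else if c = '.' then _ else
                decide (groups = [] ∨ n - j ≥ ((groups.length : Int) - 1) + (groups.sum - count))) = _
          rw [if_neg hch, if_neg hcd, bGen_cons_other cs groups count c hch hcd]
          unfold bTail
          rcases hinv with rfl | ⟨g, gs, rfl, hpos, hle⟩
          · simp only [List.length_nil, List.take_zero, List.drop_zero, if_true]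
            rw [if_neg (by simp), if_neg (by simp),
              show n - j = (cs.length : Int) + 1 from by omega]
            exact decide_eq_decide.mpr Iff.rfl
          · simp only [List.length_nil, List.take_zero, List.drop_zero]
            rw [if_neg (by simp), if_neg (by push Not; intro _; simp; omega), if_pos trivial,
              show n - j = (cs.length : Int) + 1 from by omega]
            exact decide_eq_decide.mpr Iff.rfl

-- ===== VERDICT (by name: the statement is the Claim_ definition above) =====
theorem checkOption_spec : Claim_equal_checkOption := by
  intro option groups _
  unfold Spec_checkOption
  rw [alt_eq_bGen]
  exact loop_eq_bGen option.toList (option.toList.length : Int) 0 groups 0 (by omega) (Or.inl rfl)
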